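-- pv_equiv track=rewrite | github.com/enzojunq/AcademiaPython-Insper | 06.Lista/peso_3/kits_para_corredores.py | organiza_filas
-- ===== SOURCE A (Python) =====
-- def organiza_filas(lista):
--     fila1=[]
--     fila2=[]
--     fila3=[]
--     fila4=[]
--
--     for pessoa in lista:
--         if pessoa[1]<=20:
--             fila1.append(pessoa[0])
--         elif pessoa[1]<=40:
--             fila2.append(pessoa[0])
--         elif pessoa[1]<=60:
--             fila3.append(pessoa[0])
--         else:
--             fila4.append(pessoa[0])
--     return [fila1,fila2,fila3,fila4]
-- ===== SOURCE B (Python) =====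
-- def organiza_filas(lista):
--     faixas = [(None, 20), (20, 40), (40, 60), (60, None)]
--     return [
--         [nome for nome, idade in lista
--          if (lo is None or lo < idade) and (hi is None or idade <= hi)]
--         for lo, hi in faixas
--     ]
-- ===== Notes on version B (the rewrite author's own statement) =====
-- stated objective: alternative
-- what changed: Replaces the single-pass if/elif bucketing into four mutable queues by four independent filtering passes, one comprehension per age band over an (lo, hi] interval table; each filter preserves input order, so the queues coincide.
import Mathlib
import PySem

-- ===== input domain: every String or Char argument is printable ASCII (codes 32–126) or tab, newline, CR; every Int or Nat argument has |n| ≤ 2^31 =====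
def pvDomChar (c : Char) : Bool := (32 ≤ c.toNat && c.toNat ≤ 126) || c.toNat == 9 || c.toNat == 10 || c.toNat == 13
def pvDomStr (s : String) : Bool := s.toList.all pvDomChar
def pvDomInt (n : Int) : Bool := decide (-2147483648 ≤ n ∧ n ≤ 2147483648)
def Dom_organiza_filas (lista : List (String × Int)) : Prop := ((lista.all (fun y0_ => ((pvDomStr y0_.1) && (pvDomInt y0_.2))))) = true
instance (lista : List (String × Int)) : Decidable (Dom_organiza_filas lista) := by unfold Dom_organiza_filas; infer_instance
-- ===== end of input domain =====

-- B replaces A's single-pass if/elif bucketing by four independent filtering passes over an interval table; same output, alternative decomposition.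

-- ===== PORT A =====
-- loop state: the four queues fila1..fila4, appended to exactly as A does
def organiza_filas (lista : List (String × Int)) : List (List String) :=
  let s := lista.foldl
    (fun (s : List String × List String × List String × List String) pessoa =>
      if pessoa.2 ≤ 20 then (s.1 ++ [pessoa.1], s.2.1, s.2.2.1, s.2.2.2)
      else if pessoa.2 ≤ 40 then (s.1, s.2.1 ++ [pessoa.1], s.2.2.1, s.2.2.2)
      else if pessoa.2 ≤ 60 then (s.1, s.2.1, s.2.2.1 ++ [pessoa.1], s.2.2.2)
      else (s.1, s.2.1, s.2.2.1, s.2.2.2 ++ [pessoa.1]))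
    ([], [], [], [])
  [s.1, s.2.1, s.2.2.1, s.2.2.2]

-- ===== PORT B =====
-- one age band (lo, hi]: None = unbounded end, as in Source B's faixas table
def pvFaixa (lo hi : Option Int) (lista : List (String × Int)) : List String :=
  (lista.filter (fun p =>
    (match lo with | none => true | some l => decide (l < p.2)) &&
    (match hi with | none => true | some h => decide (p.2 ≤ h)))).map (·.1)

def pvFaixas : List (Option Int × Option Int) :=
  [(none, some 20), (some 20, some 40), (some 40, some 60), (some 60, none)]

def organiza_filas_alt (lista : List (String × Int)) : List (List String) :=
  pvFaixas.map (fun f => pvFaixa f.1 f.2 lista)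

-- ===== PRECONDITION & SPEC =====
def Spec_organiza_filas (lista : List (String × Int)) (out : List (List String)) : Prop := out = organiza_filas_alt lista
instance (lista : List (String × Int)) (out : List (List String)) : Decidable (Spec_organiza_filas lista out) := by unfold Spec_organiza_filas; infer_instance

-- ===== CLAIM (what is proved, stated in full; the proofs are below) =====
def Claim_equal_organiza_filas : Prop := ∀ (lista : List (String × Int)), Dom_organiza_filas lista → Spec_organiza_filas lista (organiza_filas lista)

-- ===== LEMMAS AND PROOFS =====

theorem organiza_filas_loop (lista : List (String × Int))
    (f1 f2 f3 f4 : List String) :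
    (let s := lista.foldl
      (fun (s : List String × List String × List String × List String) pessoa =>
        if pessoa.2 ≤ 20 then (s.1 ++ [pessoa.1], s.2.1, s.2.2.1, s.2.2.2)
        else if pessoa.2 ≤ 40 then (s.1, s.2.1 ++ [pessoa.1], s.2.2.1, s.2.2.2)
        else if pessoa.2 ≤ 60 then (s.1, s.2.1, s.2.2.1 ++ [pessoa.1], s.2.2.2)
        else (s.1, s.2.1, s.2.2.1, s.2.2.2 ++ [pessoa.1]))
      (f1, f2, f3, f4)
     [s.1, s.2.1, s.2.2.1, s.2.2.2]) =
    [f1 ++ pvFaixa none (some 20) lista,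
     f2 ++ pvFaixa (some 20) (some 40) lista,
     f3 ++ pvFaixa (some 40) (some 60) lista,
     f4 ++ pvFaixa (some 60) none lista] := by
  induction lista generalizing f1 f2 f3 f4 with
  | nil => simp [pvFaixa]
  | cons p t ih =>
    simp only [List.foldl_cons]
    by_cases h1 : p.2 ≤ 20
    · have := ih (f1 ++ [p.1]) f2 f3 f4
      simp only [h1, if_true] at this ⊢
      rw [this]
      have h2 : ¬ (20:Int) < p.2 := by omega
      have h3 : ¬ (40:Int) < p.2 := by omega
      have h4 : ¬ (60:Int) < p.2 := by omega
      simp [pvFaixa, h1, h2, h3, h4]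
    · by_cases h2 : p.2 ≤ 40
      · have := ih f1 (f2 ++ [p.1]) f3 f4
        simp only [h1, h2, if_true, if_false] at this ⊢
        rw [this]
        have g1 : (20:Int) < p.2 := by omega
        have g2 : ¬ (40:Int) < p.2 := by omega
        have g3 : ¬ (60:Int) < p.2 := by omega
        simp [pvFaixa, h1, h2, g1, g2, g3]
      · by_cases h3 : p.2 ≤ 60
        · have := ih f1 f2 (f3 ++ [p.1]) f4
          simp only [h1, h2, h3, if_true, if_false] at this ⊢
          rw [this]
          have g1 : (20:Int) < p.2 := by omega
          have g2 : (40:Int) < p.2 := by omega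
          have g3 : ¬ (60:Int) < p.2 := by omega
          simp [pvFaixa, h1, h2, h3, g1, g2, g3]
        · have := ih f1 f2 f3 (f4 ++ [p.1])
          simp only [h1, h2, h3, if_false] at this ⊢
          rw [this]
          have g1 : (20:Int) < p.2 := by omega
          have g2 : (40:Int) < p.2 := by omega
          have g3 : (60:Int) < p.2 := by omega
          simp [pvFaixa, h1, h2, h3, g1, g2, g3]

-- ===== VERDICT (by name: the statement is the Claim_ definition above) =====
theorem organiza_filas_spec : Claim_equal_organiza_filas := by
  intro lista _
  unfold Spec_organiza_filas organiza_filas organiza_filas_alt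
  rw [organiza_filas_loop lista [] [] [] []]
  simp [pvFaixas]
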